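-- pv_equiv track=rewrite | github.com/tnwei/python-rle | rle/__init__.py | _combine_values_counts
-- ===== SOURCE A (Python) =====
-- def _combine_values_counts(values, counts):
--     new_values = []
--     new_counts = []
--     overflow_count = 0
--
--     for i in range(len(values)-1):
--         if values[i] == values[i+1]:
--             overflow_count = overflow_count + counts[i]
--         else:
--             new_values.append(values[i])
--             new_counts.append(counts[i] + overflow_count)
--             overflow_count = 0
--
--     # Last value needs to be added manually
--     # due to how the loop is set up
--     new_values.append(values[-1])
--     new_counts.append(counts[-1] + overflow_count)
--
--     return new_values, new_counts
-- ===== SOURCE B (Python) =====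
-- def _combine_values_counts(values, counts):
--     new_values = []
--     new_counts = []
--     for v, c in zip(values[:-1], counts):
--         if new_values and new_values[-1] == v:
--             new_counts[-1] += c
--         else:
--             new_values.append(v)
--             new_counts.append(c)
--     v, c = values[-1], counts[-1]
--     if new_values and new_values[-1] == v:
--         new_counts[-1] += c
--     else:
--         new_values.append(v)
--         new_counts.append(c)
--     return new_values, new_counts
-- ===== Notes on version B (the rewrite author's own statement) =====
-- stated objective: alternative
-- what changed: A scans indices with a lookahead values[i+1], a separate overflow accumulator flushed on transitions and a manual append of values[-1]/counts[-1]; B folds the zip(values[:-1], counts) pairs left to right, merging each pair into the tail of the output when it equals the last emitted value, and feeds the final (values[-1], counts[-1]) pair through the same merge step, with no lookahead and no overflow state.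
import Mathlib
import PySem

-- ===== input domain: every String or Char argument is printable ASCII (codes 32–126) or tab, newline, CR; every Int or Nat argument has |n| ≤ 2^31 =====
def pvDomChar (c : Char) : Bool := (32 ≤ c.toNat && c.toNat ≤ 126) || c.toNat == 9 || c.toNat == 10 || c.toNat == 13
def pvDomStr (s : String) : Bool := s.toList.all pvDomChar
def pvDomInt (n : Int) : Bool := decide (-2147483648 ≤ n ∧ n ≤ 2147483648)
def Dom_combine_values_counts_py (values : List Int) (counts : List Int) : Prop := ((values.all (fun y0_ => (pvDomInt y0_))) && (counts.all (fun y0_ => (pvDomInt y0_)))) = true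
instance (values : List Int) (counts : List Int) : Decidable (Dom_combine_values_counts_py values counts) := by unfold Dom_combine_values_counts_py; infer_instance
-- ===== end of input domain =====

-- B replaces A's indexed lookahead loop (values[i] vs values[i+1]) with overflow
-- accumulator by a fold over the (value, count) pairs that merges each pair into the
-- tail of the output; the final pair is (values[-1], counts[-1]), as in A's last step.

-- ===== PORT A =====
-- Literal port of A: for i in range(len(values)-1) with lookahead values[i+1] and an
-- overflow accumulator, then the manual append of values[-1] / counts[-1].
def combine_values_counts_py (values : List Int) (counts : List Int) : List Int × List Int :=
  let s := (PySem.List.pyRange 0 ((values.length : Int) - 1) 1).foldl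
    (fun (st : List Int × List Int × Int) i =>
      if PySem.List.pyGetD values i 0 = PySem.List.pyGetD values (i + 1) 0 then
        (st.1, st.2.1, st.2.2 + PySem.List.pyGetD counts i 0)
      else
        (st.1 ++ [PySem.List.pyGetD values i 0],
         st.2.1 ++ [PySem.List.pyGetD counts i 0 + st.2.2], 0))
    ([], [], 0)
  (s.1 ++ [PySem.List.pyGetD values (-1) 0],
   s.2.1 ++ [PySem.List.pyGetD counts (-1) 0 + s.2.2])

-- ===== PORT B =====
-- Literal port of B: fold over zip(values[:-1], counts); 'new_values and
-- new_values[-1] == v' is the getLast? match, 'new_counts[-1] += c' is the in-place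
-- update of the last element; then the same merge step for (values[-1], counts[-1]).
def combine_values_counts_py_alt (values : List Int) (counts : List Int) : List Int × List Int :=
  let acc := ((PySem.List.slice values none (some (-1))).zip counts).foldl
    (fun (acc : List Int × List Int) vc =>
      match acc.1.getLast? with
      | some last =>
          if last = vc.1 then (acc.1, acc.2.dropLast ++ [acc.2.getLastD 0 + vc.2])
          else (acc.1 ++ [vc.1], acc.2 ++ [vc.2])
      | none => (acc.1 ++ [vc.1], acc.2 ++ [vc.2]))
    ([], [])
  let v := PySem.List.pyGetD values (-1) 0
  let c := PySem.List.pyGetD counts (-1) 0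
  match acc.1.getLast? with
  | some last =>
      if last = v then (acc.1, acc.2.dropLast ++ [acc.2.getLastD 0 + c])
      else (acc.1 ++ [v], acc.2 ++ [c])
  | none => (acc.1 ++ [v], acc.2 ++ [c])

-- ===== PRECONDITION & SPEC =====
-- Pre_ is exactly the set of inputs on which A returns: A raises IndexError when values
-- is empty, counts is empty, or counts is more than one element shorter than values.
def Pre_combine_values_counts_py (values : List Int) (counts : List Int) : Prop :=
  values ≠ [] ∧ counts ≠ [] ∧ values.length ≤ counts.length + 1
instance (values : List Int) (counts : List Int) : Decidable (Pre_combine_values_counts_py values counts) := by unfold Pre_combine_values_counts_py; infer_instance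
def pvWitness_combine_values_counts_py : List Int × List Int := ([1, 1, 2], [3, 4, 5])

def Spec_combine_values_counts_py (values : List Int) (counts : List Int) (out : List Int × List Int) : Prop := out = combine_values_counts_py_alt values counts
instance (values : List Int) (counts : List Int) (out : List Int × List Int) : Decidable (Spec_combine_values_counts_py values counts out) := by unfold Spec_combine_values_counts_py; infer_instance

-- ===== CLAIM (what is proved, stated in full; the proofs are below) =====
def Claim_equal_combine_values_counts_py : Prop := ∀ (values : List Int) (counts : List Int), Dom_combine_values_counts_py values counts → Pre_combine_values_counts_py values counts → Spec_combine_values_counts_py values counts (combine_values_counts_py values counts)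

-- ===== LEMMAS AND PROOFS =====

-- Reference recursion both ports are reduced to: pvRefP v c ps merges the run headed by
-- the pending pair (v, c) through the remaining pairs ps.
def pvRefP : Int → Int → List (Int × Int) → List Int × List Int
  | v, c, [] => ([v], [c])
  | v, c, (v', c') :: xs =>
      if v = v' then pvRefP v (c + c') xs
      else ((v :: (pvRefP v' c' xs).1), (c :: (pvRefP v' c' xs).2))

-- A's loop body, as a function of the triple ((values[i], values[i+1]), counts[i]).
def pvGA (st : List Int × List Int × Int) (p : (Int × Int) × Int) : List Int × List Int × Int :=
  if p.1.1 = p.1.2 then (st.1, st.2.1, st.2.2 + p.2)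
  else (st.1 ++ [p.1.1], st.2.1 ++ [p.2 + st.2.2], 0)

-- A's fold over the triples, with the final manual appends, equals pvRefP.
theorem pvMasterA (vs : List Int) : ∀ (cs : List Int) (v c : Int) (nv nc : List Int) (ov : Int),
    vs.length = cs.length →
    (let s := ((((v :: vs).zip vs).zip (c :: cs)).foldl pvGA (nv, nc, ov))
     ((s.1 ++ [(v :: vs).getLastD 0], s.2.1 ++ [(c :: cs).getLastD 0 + s.2.2]) : List Int × List Int))
    = (nv ++ (pvRefP v (c + ov) (vs.zip cs)).1, nc ++ (pvRefP v (c + ov) (vs.zip cs)).2) := by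
  induction vs with
  | nil =>
      intro cs v c nv nc ov h
      have : cs = [] := by simpa using h.symm
      subst this
      simp [pvRefP]
  | cons v' vs' ih =>
      intro cs v c nv nc ov h
      match cs with
      | c' :: cs' =>
        have h' : vs'.length = cs'.length := by simpa using h
        simp only [List.zip_cons_cons, List.foldl_cons]
        have hlv : (v :: v' :: vs').getLastD 0 = (v' :: vs').getLastD 0 := by
          simp [List.getLastD]
        have hlc : (c :: c' :: cs').getLastD 0 = (c' :: cs').getLastD 0 := by
          simp [List.getLastD]
        by_cases hv : v = v'
        · have hg : pvGA (nv, nc, ov) ((v, v'), c) = (nv, nc, ov + c) := by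
            simp [pvGA, hv]
          have hih := ih cs' v' c' nv nc (ov + c) h'
          simp only [] at hih
          rw [hg, hlv, hlc, hih]
          subst hv
          rw [pvRefP]
          ring_nf
          simp
        · have hg : pvGA (nv, nc, ov) ((v, v'), c) = (nv ++ [v], nc ++ [c + ov], 0) := by
            simp [pvGA, hv]
          have hih := ih cs' v' c' (nv ++ [v]) (nc ++ [c + ov]) 0 h'
          simp only [] at hih
          rw [hg, hlv, hlc, hih, pvRefP]
          simp [hv, List.append_assoc]

-- B's fold, started with a last pending pair (v, c) already emitted, equals pvRefP.
theorem pvMasterB (ps : List (Int × Int)) : ∀ (v c : Int) (nv nc : List Int),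
    ps.foldl
      (fun (acc : List Int × List Int) vc =>
        match acc.1.getLast? with
        | some last =>
            if last = vc.1 then (acc.1, acc.2.dropLast ++ [acc.2.getLastD 0 + vc.2])
            else (acc.1 ++ [vc.1], acc.2 ++ [vc.2])
        | none => (acc.1 ++ [vc.1], acc.2 ++ [vc.2]))
      (nv ++ [v], nc ++ [c])
    = (nv ++ (pvRefP v c ps).1, nc ++ (pvRefP v c ps).2) := by
  induction ps with
  | nil => intro v c nv nc; simp [pvRefP]
  | cons p ps' ih =>
      intro v c nv nc
      obtain ⟨v', c'⟩ := p
      simp only [List.foldl_cons, List.getLast?_concat]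
      by_cases hv : v = v'
      · rw [if_pos hv]
        simp only [List.dropLast_concat, List.getLastD_concat]
        rw [ih v (c + c') nv nc, pvRefP]
        simp [hv]
      · rw [if_neg hv]
        rw [ih v' c' (nv ++ [v]) (nc ++ [c]), pvRefP]
        simp [hv, List.append_assoc]

-- pyGetD xs (-1) d is the last element on a nonempty list.
theorem pvGetNegOne (xs : List Int) (h : xs ≠ []) :
    PySem.List.pyGetD xs (-1) 0 = xs.getLastD 0 := by
  have h1 : 1 ≤ xs.length := List.length_pos_iff.mpr h
  rw [show ((-1 : Int)) = -((1 : Nat) : Int) by norm_num]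
  rw [PySem.List.pyGetD_neg_natCast xs 1 0 (by norm_num) h1]
  rw [List.getLastD_eq_getLast?, List.getLast?_eq_getElem?]
  rw [List.getElem?_eq_getElem (by omega)]
  rfl

-- zipping with a truncation of the second list changes nothing (exact?/simp? found no name).
theorem pvZipTake (xs ys : List Int) : xs.zip (ys.take xs.length) = xs.zip ys := by
  induction xs generalizing ys with
  | nil => simp
  | cons x xs ih =>
      cases ys with
      | nil => simp
      | cons y ys => simp [List.zip_cons_cons, ih]

-- A's indexed loop is the fold of pvGA over the triples
-- ((values[i], values[i+1]), counts[i]), with counts capped at len(values)-1 pairs and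
-- the final count taken from counts[-1].
theorem pvAEqTriples (v : Int) (vs : List Int) (counts : List Int) (hc : counts ≠ [])
    (h : vs.length ≤ counts.length) :
    combine_values_counts_py (v :: vs) counts
    = (let s := ((((v :: vs).zip vs).zip (counts.take vs.length ++ [counts.getLastD 0])).foldl pvGA ([], [], 0))
       ((s.1 ++ [(v :: vs).getLastD 0],
         s.2.1 ++ [(counts.take vs.length ++ [counts.getLastD 0]).getLastD 0 + s.2.2]) : List Int × List Int)) := by
  have htake : (counts.take vs.length).length = vs.length := by
    simp [List.length_take]; omega
  have hlen : (((v :: vs).zip vs).zip (counts.take vs.length ++ [counts.getLastD 0])).length = vs.length := by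
    simp [List.length_zip, htake]
  unfold combine_values_counts_py
  have hbound : (((v :: vs).length : Int) - 1)
      = ((((v :: vs).zip vs).zip (counts.take vs.length ++ [counts.getLastD 0])).length : Int) := by
    rw [List.length_cons, hlen]
    push_cast
    omega
  rw [hbound]
  have hcongr :
      (PySem.List.pyRange 0 ((((((v :: vs).zip vs).zip (counts.take vs.length ++ [counts.getLastD 0]))).length : Int)) 1).foldl
        (fun (st : List Int × List Int × Int) i =>
          if PySem.List.pyGetD (v :: vs) i 0 = PySem.List.pyGetD (v :: vs) (i + 1) 0 then
            (st.1, st.2.1, st.2.2 + PySem.List.pyGetD counts i 0)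
          else
            (st.1 ++ [PySem.List.pyGetD (v :: vs) i 0],
             st.2.1 ++ [PySem.List.pyGetD counts i 0 + st.2.2], 0))
        ([], [], 0)
      = (PySem.List.pyRange 0 ((((((v :: vs).zip vs).zip (counts.take vs.length ++ [counts.getLastD 0]))).length : Int)) 1).foldl
          (fun (st : List Int × List Int × Int) i =>
            pvGA st (PySem.List.pyGetD (((v :: vs).zip vs).zip (counts.take vs.length ++ [counts.getLastD 0])) i ((0, 0), 0)))
          ([], [], 0) := by
    apply PySem.List.foldl_congr_mem
    intro acc i hi
    rw [PySem.List.mem_pyRange_one] at hi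
    obtain ⟨h0, h1⟩ := hi
    rw [hlen] at h1
    have hik : i.toNat < vs.length := by omega
    have e1 : PySem.List.pyGetD (v :: vs) i 0 = (v :: vs)[i.toNat]'(by simp only [List.length_cons]; omega) :=
      PySem.List.pyGetD_eq_getElem _ _ h0 (by simp only [List.length_cons]; push_cast; omega)
    have e2 : PySem.List.pyGetD (v :: vs) (i + 1) 0 = vs[i.toNat]'hik := by
      rw [PySem.List.pyGetD_eq_getElem _ _ (by omega) (by simp only [List.length_cons]; push_cast; omega)]
      have : (i + 1).toNat = i.toNat + 1 := by omega
      simp [this]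
    have e3 : PySem.List.pyGetD counts i 0
        = (counts.take vs.length ++ [counts.getLastD 0])[i.toNat]'(by simp [htake]; omega) := by
      rw [PySem.List.pyGetD_eq_getElem _ _ h0 (by omega)]
      rw [List.getElem_append_left (by omega)]
      simp
    have e4 : PySem.List.pyGetD (((v :: vs).zip vs).zip (counts.take vs.length ++ [counts.getLastD 0])) i ((0, 0), 0)
        = (((v :: vs)[i.toNat]'(by simp only [List.length_cons]; omega), vs[i.toNat]'hik),
           (counts.take vs.length ++ [counts.getLastD 0])[i.toNat]'(by simp [htake]; omega)) := by
      rw [PySem.List.pyGetD_eq_getElem _ _ h0 (by rw [hlen]; exact_mod_cast h1)]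
      simp [List.getElem_zip]
    rw [e1, e2, e3, e4, pvGA]
  rw [hcongr, PySem.List.foldl_pyRange_zero_pyGetD']
  rw [pvGetNegOne (v :: vs) (by simp), pvGetNegOne counts hc]
  rw [show (counts.take vs.length ++ [counts.getLastD 0]).getLastD 0 = counts.getLastD 0 from
        List.getLastD_concat]

-- B's processed pair sequence zip(values[:-1], counts) ++ [(values[-1], counts[-1])]
-- is values zipped with counts capped at len(values)-1 and closed with counts[-1].
theorem pvBPairs (v : Int) (vs : List Int) (counts : List Int) (h : vs.length ≤ counts.length) :
    ((v :: vs).dropLast.zip counts) ++ [((v :: vs).getLastD 0, counts.getLastD 0)]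
    = (v :: vs).zip (counts.take vs.length ++ [counts.getLastD 0]) := by
  have hne : (v :: vs) ≠ [] := by simp
  have hsplit : (v :: vs) = (v :: vs).dropLast ++ [(v :: vs).getLastD 0] := by
    rw [List.getLastD_eq_getLast?, List.getLast?_eq_some_getLast hne]
    exact (List.dropLast_append_getLast hne).symm
  conv_rhs => rw [hsplit]
  rw [List.zip_append (by simp [List.length_take]; omega)]
  rw [show counts.take vs.length = counts.take (v :: vs).dropLast.length from by simp]
  rw [pvZipTake]
  simp

-- ===== VERDICT (by name: the statement is the Claim_ definition above) =====
theorem combine_values_counts_py_spec : Claim_equal_combine_values_counts_py := by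
  intro values counts _ hpre
  obtain ⟨hnev, hnec, hlen⟩ := hpre
  unfold Spec_combine_values_counts_py
  match values with
  | v :: vs =>
    have h : vs.length ≤ counts.length := by
      simp only [List.length_cons] at hlen; omega
    -- name the adjusted count list and put it in cons form
    have hcs'len : (counts.take vs.length ++ [counts.getLastD 0]).length = vs.length + 1 := by
      simp [List.length_take]; omega
    match hcs' : counts.take vs.length ++ [counts.getLastD 0] with
    | [] => exact absurd hcs' (by simp)
    | c' :: cs'' =>
      have hlen'' : vs.length = cs''.length := by
        rw [hcs'] at hcs'len; simpa using hcs'len.symm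
      -- A side
      rw [pvAEqTriples v vs counts hnec h]
      simp only [hcs']
      rw [pvMasterA vs cs'' v c' [] [] 0 hlen'']
      -- B side
      have hB : combine_values_counts_py_alt (v :: vs) counts
          = ((((v :: vs).dropLast.zip counts) ++ [((v :: vs).getLastD 0, counts.getLastD 0)]).foldl
              (fun (acc : List Int × List Int) vc =>
                match acc.1.getLast? with
                | some last =>
                    if last = vc.1 then (acc.1, acc.2.dropLast ++ [acc.2.getLastD 0 + vc.2])
                    else (acc.1 ++ [vc.1], acc.2 ++ [vc.2])
                | none => (acc.1 ++ [vc.1], acc.2 ++ [vc.2]))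
              ([], [])) := by
        unfold combine_values_counts_py_alt
        simp only [PySem.List.slice_to_neg_one]
        rw [pvGetNegOne (v :: vs) (by simp), pvGetNegOne counts hnec]
        rw [List.foldl_concat]
      rw [hB, pvBPairs v vs counts h, hcs', List.zip_cons_cons, List.foldl_cons]
      have hfirst :
          (match ([] : List Int).getLast? with
            | some last =>
                if last = (v, c').1 then (([] : List Int), ([] : List Int).dropLast ++ [([] : List Int).getLastD 0 + (v, c').2])
                else (([] : List Int) ++ [(v, c').1], ([] : List Int) ++ [(v, c').2])
            | none => (([] : List Int) ++ [(v, c').1], ([] : List Int) ++ [(v, c').2]))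
          = (([] : List Int) ++ [v], ([] : List Int) ++ [c']) := by simp
      rw [hfirst, pvMasterB (vs.zip cs'') v c' [] []]
      simp
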